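-- pv_equiv track=rewrite | github.com/hbnnnnnnn/CSC14003-CNF-gem-hunter | source/another.py | interpret_model
-- ===== SOURCE A (Python) =====
-- def coordinate_to_literal(i, j, m):
--     return i * m + j + 1
--
-- def interpret_model(model, matrix):
--     n = len(matrix)
--     m = len(matrix[0])
--     result = [[cell for cell in row] for row in matrix]
--
--     for i in range(n):
--         for j in range(m):
--             if matrix[i][j] == '_':
--                 literal = coordinate_to_literal(i, j, m)
--                 if literal in model:
--                     result[i][j] = 'T'
--                 else:
--                     result[i][j] = 'G'
--
--     return result
-- ===== SOURCE B (Python) =====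
-- def interpret_model(model, matrix):
--     n = len(matrix)
--     m = len(matrix[0])
--     result = [row[:] for row in matrix]
--     for i in range(n):
--         for j in range(m):
--             if matrix[i][j] == '_':
--                 result[i][j] = 'G'
--     for lit in model:
--         if 1 <= lit <= n * m:
--             q, r = divmod(lit - 1, m)
--             if matrix[q][r] == '_':
--                 result[q][r] = 'T'
--     return result
-- ===== Notes on version B (the rewrite author's own statement) =====
-- stated objective: alternative
-- what changed: Instead of deciding T/G per blank cell with a linear 'literal in model' scan, B first marks every blank grid cell 'G' and then makes one pass over the model, decoding each in-range literal with divmod to set its cell to 'T'.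
import Mathlib
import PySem

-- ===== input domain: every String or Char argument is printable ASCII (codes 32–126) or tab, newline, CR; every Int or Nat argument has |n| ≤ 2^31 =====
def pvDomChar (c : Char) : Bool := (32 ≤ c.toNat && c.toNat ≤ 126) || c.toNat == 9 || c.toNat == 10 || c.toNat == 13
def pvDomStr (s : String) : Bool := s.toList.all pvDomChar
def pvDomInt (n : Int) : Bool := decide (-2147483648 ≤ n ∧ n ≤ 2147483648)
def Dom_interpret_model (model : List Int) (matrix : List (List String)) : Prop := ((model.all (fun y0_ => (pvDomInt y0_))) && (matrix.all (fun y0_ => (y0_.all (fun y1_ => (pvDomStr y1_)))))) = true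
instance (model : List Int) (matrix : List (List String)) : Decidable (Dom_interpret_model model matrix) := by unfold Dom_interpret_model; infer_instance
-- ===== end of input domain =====

-- B replaces A's per-cell T/G decision via a 'literal in model' list scan by a 'G'-fill of the
-- blank grid cells followed by one divmod-decoding pass over the model (objective: alternative).

-- ===== PORT A =====
def coordinate_to_literal (i j m : Int) : Int := i * m + j + 1

def interpret_model (model : List Int) (matrix : List (List String)) : List (List String) :=
  let n : Int := PySem.List.len matrix
  let m : Int := PySem.List.len (PySem.List.pyGetD matrix 0 [])
  let result : List (List String) := matrix.map (fun row => row.map (fun cell => cell))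
  (PySem.List.pyRange 0 n 1).foldl (fun result i =>
    (PySem.List.pyRange 0 m 1).foldl (fun result j =>
      if PySem.List.pyGetD (PySem.List.pyGetD matrix i []) j "" == "_" then
        let literal := coordinate_to_literal i j m
        if model.contains literal then
          PySem.List.pySetD result i (PySem.List.pySetD (PySem.List.pyGetD result i []) j "T")
        else
          PySem.List.pySetD result i (PySem.List.pySetD (PySem.List.pyGetD result i []) j "G")
      else result) result) result
-- ===== PORT B =====
def interpret_model_alt (model : List Int) (matrix : List (List String)) : List (List String) :=
  let n : Int := PySem.List.len matrix
  let m : Int := PySem.List.len (PySem.List.pyGetD matrix 0 [])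
  let result : List (List String) := matrix.map (fun row => row.map (fun cell => cell))
  let result : List (List String) := (PySem.List.pyRange 0 n 1).foldl (fun result i =>
    (PySem.List.pyRange 0 m 1).foldl (fun result j =>
      if PySem.List.pyGetD (PySem.List.pyGetD matrix i []) j "" == "_" then
        PySem.List.pySetD result i (PySem.List.pySetD (PySem.List.pyGetD result i []) j "G")
      else result) result) result
  model.foldl (fun result lit =>
    if 1 ≤ lit ∧ lit ≤ n * m then
      let q := PySem.Int.floordiv (lit - 1) m
      let r := PySem.Int.mod (lit - 1) m
      if PySem.List.pyGetD (PySem.List.pyGetD matrix q []) r "" == "_" then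
        PySem.List.pySetD result q (PySem.List.pySetD (PySem.List.pyGetD result q []) r "T")
      else result
    else result) result

-- ===== PRECONDITION & SPEC =====
-- Pre_ excludes exactly the inputs on which A raises IndexError: the empty matrix (matrix[0])
-- and matrices having a row shorter than row 0 (matrix[i][j] for every j < len(matrix[0])).
def Pre_interpret_model (model : List Int) (matrix : List (List String)) : Prop :=
  matrix ≠ [] ∧ ∀ row ∈ matrix, (matrix.getD 0 []).length ≤ row.length
instance (model : List Int) (matrix : List (List String)) : Decidable (Pre_interpret_model model matrix) := by unfold Pre_interpret_model; infer_instance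

def pvWitness_interpret_model : List Int × List (List String) := ([1, 3], [["_", "x"], ["_", "_"]])

def Spec_interpret_model (model : List Int) (matrix : List (List String)) (out : List (List String)) : Prop := out = interpret_model_alt model matrix
instance (model : List Int) (matrix : List (List String)) (out : List (List String)) : Decidable (Spec_interpret_model model matrix out) := by unfold Spec_interpret_model; infer_instance

-- ===== CLAIM (what is proved, stated in full; the proofs are below) =====
def Claim_equal_interpret_model : Prop := ∀ (model : List Int) (matrix : List (List String)), Dom_interpret_model model matrix → Pre_interpret_model model matrix → Spec_interpret_model model matrix (interpret_model model matrix)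

-- ===== LEMMAS AND PROOFS =====

-- the blank test both programs perform at integer coordinates (i, j)
def pvCondA (matrix : List (List String)) (i j : Int) : Bool :=
  PySem.List.pyGetD (PySem.List.pyGetD matrix i []) j "" == "_"

-- "some literal of model marks cell (k, t)" in B's model pass
def pvHitB (model : List Int) (matrix : List (List String)) (m0 k t : Nat) : Bool :=
  model.any (fun lit =>
    decide (1 ≤ lit ∧ lit ≤ (matrix.length : Int) * (m0 : Int)) &&
    decide (PySem.Int.floordiv (lit - 1) (m0 : Int) = (k : Int)) &&
    decide (PySem.Int.mod (lit - 1) (m0 : Int) = (t : Int)) &&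
    pvCondA matrix (k : Int) (t : Int))


lemma pv_row_fold_getElem? (cond : Int → Bool) (val : Int → String) (js : List Int)
    (hjs : ∀ j ∈ js, 0 ≤ j) :
    ∀ (row : List String) (t : Nat),
    (js.foldl (fun row j => if cond j then PySem.List.pySetD row j (val j) else row) row)[t]? =
    if (t : Int) ∈ js ∧ cond t ∧ t < row.length then some (val t) else row[t]? := by
  induction js with
  | nil => intro row t; simp
  | cons j js ih =>
    intro row t
    have hj : 0 ≤ j := hjs j (by simp)
    have hjs' : ∀ x ∈ js, 0 ≤ x := fun x hx => hjs x (by simp [hx])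
    simp only [List.foldl_cons]
    by_cases hc : cond j
    · rw [if_pos hc, ih hjs' (PySem.List.pySetD row j (val j)) t,
        PySem.List.pySetD_of_nonneg _ _ hj]
      by_cases hjt : (t : Int) = j
      · subst hjt
        simp only [Int.toNat_natCast, List.length_set, List.getElem?_set, List.mem_cons]
        by_cases hl : t < row.length
        · split_ifs <;> simp_all
        · have : row[t]? = none := by rw [List.getElem?_eq_none]; omega
          split_ifs <;> simp_all
      · have htn : ¬ (j.toNat = t) := by omega
        simp only [List.length_set, List.getElem?_set, htn, if_false, List.mem_cons]
        have : ((t : Int) = j) = False := by simp [hjt]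
        simp [this]
    · rw [if_neg hc, ih hjs' row t]
      by_cases hjt : (t : Int) = j
      · subst hjt; simp [hc]
      · simp [hjt]


lemma pv_inner_fold (cond : Int → Bool) (val : Int → String) (js : List Int) (i : Nat) :
    ∀ (res : List (List String)), i < res.length →
    js.foldl (fun res j => if cond j then
        PySem.List.pySetD res (i : Int) (PySem.List.pySetD (PySem.List.pyGetD res (i : Int) []) j (val j))
      else res) res
    = res.set i (js.foldl (fun row j => if cond j then PySem.List.pySetD row j (val j) else row)
        (res.getD i [])) := by
  induction js with
  | nil =>
    intro res hi
    simp only [List.foldl_nil]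
    apply List.ext_getElem?
    intro k
    rw [List.getElem?_set]
    by_cases hk : k = i
    · subst hk; simp [List.getD, hi, List.getElem?_eq_getElem hi]
    · simp [Ne.symm hk, hk]
  | cons j js ih =>
    intro res hi
    simp only [List.foldl_cons]
    by_cases hc : cond j
    · rw [if_pos hc, if_pos hc]
      rw [PySem.List.pyGetD_natCast, PySem.List.pySetD_natCast]
      rw [ih _ (by simp [hi])]
      rw [List.set_set]
      congr 1
      simp [List.getD, List.getElem?_set_self, hi]
    · rw [if_neg hc, if_neg hc, ih res hi]
-- a row-level fold of guarded writes keeps the row's length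
lemma pv_row_fold_length (cond : Int → Bool) (val : Int → String) (js : List Int)
    (row : List String) :
    (js.foldl (fun row j => if cond j then PySem.List.pySetD row j (val j) else row) row).length
      = row.length := by
  induction js generalizing row with
  | nil => rfl
  | cons j js ih =>
    simp only [List.foldl_cons]
    by_cases hc : cond j
    · rw [if_pos hc, ih, PySem.List.length_pySetD]
    · rw [if_neg hc, ih]

-- the final value of row k under a guarded nested grid loop writing val
def pvRow (matrix : List (List String)) (m0 : Nat) (val : Int → Int → String) (k : Nat) :
    List String :=
  (PySem.List.pyRange 0 (m0 : Int) 1).foldl (fun row j =>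
    if pvCondA matrix (k : Int) j then PySem.List.pySetD row j (val (k : Int) j) else row)
    (matrix.getD k [])

-- the nested grid loop, rowwise
lemma pv_outer_fold (matrix : List (List String)) (m0 : Nat) (val : Int → Int → String)
    (is : List Nat) (hnd : is.Nodup) :
    ∀ (res : List (List String)), res.length = matrix.length →
      (∀ i ∈ is, i < matrix.length ∧ res.getD i [] = matrix.getD i []) → ∀ k : Nat,
    ((is.map Int.ofNat).foldl (fun res i =>
      (PySem.List.pyRange 0 (m0 : Int) 1).foldl (fun res j =>
        if pvCondA matrix i j then
          PySem.List.pySetD res i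
            (PySem.List.pySetD (PySem.List.pyGetD res i []) j (val i j))
        else res) res) res)[k]? =
    if k ∈ is then some (pvRow matrix m0 val k) else res[k]? := by
  induction is with
  | nil => intro res _ _ k; simp
  | cons i is ih =>
    intro res hlen hinv k
    obtain ⟨hilt, hieq⟩ := hinv i (by simp)
    have hires : i < res.length := by omega
    rw [List.map_cons, List.foldl_cons]
    simp only [Int.ofNat_eq_natCast]
    rw [pv_inner_fold (pvCondA matrix (i : Int)) (fun j => val (i : Int) j)
      (PySem.List.pyRange 0 (m0 : Int) 1) i res hires]
    have hrow : (PySem.List.pyRange 0 (m0 : Int) 1).foldl (fun row j =>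
        if pvCondA matrix (i : Int) j then
          PySem.List.pySetD row j (val (i : Int) j)
        else row) (res.getD i []) = pvRow matrix m0 val i := by
      rw [pvRow, hieq]
    rw [hrow]
    rw [ih (List.Nodup.of_cons hnd) _ (by simp [hlen]) ?_ k]
    · by_cases hk : k ∈ is
      · simp [hk]
      · rw [if_neg hk]
        by_cases hki : k = i
        · subst hki
          simp [List.getElem?_set_self, hires]
        · simp [List.mem_cons, hk, hki, List.getElem?_set_ne (Ne.symm hki)]
    · intro i' hi'
      obtain ⟨h1, h2⟩ := hinv i' (by simp [hi'])
      refine ⟨h1, ?_⟩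
      have hne : i' ≠ i := by
        intro h; subst h; exact (List.nodup_cons.mp hnd).1 hi'
      rw [← h2]
      unfold List.getD
      rw [List.getElem?_set_ne (Ne.symm hne)]

-- the length of a list is determined by which indices are populated
lemma pv_length_of_getElem? {α : Type} (l : List α) (n : Nat)
    (h : ∀ k : Nat, l[k]?.isSome ↔ k < n) : l.length = n := by
  have h1 := h l.length
  have h2 := h n
  simp at h1 h2
  omega

-- the nested grid loop over matrix applied to a generic start, as an if-then-else
lemma pv_grid_char (matrix : List (List String)) (m0 : Nat) (val : Int → Int → String)
    (k : Nat) :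
    (((List.range matrix.length).map Int.ofNat).foldl (fun res i =>
      (PySem.List.pyRange 0 (m0 : Int) 1).foldl (fun res j =>
        if pvCondA matrix i j then
          PySem.List.pySetD res i
            (PySem.List.pySetD (PySem.List.pyGetD res i []) j (val i j))
        else res) res) matrix)[k]? =
    if k < matrix.length then some (pvRow matrix m0 val k) else none := by
  rw [pv_outer_fold matrix m0 val (List.range matrix.length) (List.nodup_range) matrix rfl
    (fun i hi => ⟨List.mem_range.mp hi, rfl⟩) k]
  by_cases hk : k < matrix.length
  · rw [if_pos (List.mem_range.mpr hk), if_pos hk]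
  · rw [if_neg (fun h => hk (List.mem_range.mp h)), if_neg hk]
    rw [List.getElem?_eq_none]
    omega


lemma pv_model_fold (matrix : List (List String)) (m0 : Nat)
    (hrowlen : ∀ row ∈ matrix, m0 ≤ row.length) (model : List Int) :
    ∀ (res : List (List String)), res.length = matrix.length →
      (∀ k : Nat, res[k]?.map List.length = matrix[k]?.map List.length) →
    (model.foldl (fun result lit =>
      if 1 ≤ lit ∧ lit ≤ (matrix.length : Int) * (m0 : Int) then
        if PySem.List.pyGetD (PySem.List.pyGetD matrix (PySem.Int.floordiv (lit - 1) (m0 : Int)) [])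
            (PySem.Int.mod (lit - 1) (m0 : Int)) "" == "_" then
          PySem.List.pySetD result (PySem.Int.floordiv (lit - 1) (m0 : Int))
            (PySem.List.pySetD
              (PySem.List.pyGetD result (PySem.Int.floordiv (lit - 1) (m0 : Int)) [])
              (PySem.Int.mod (lit - 1) (m0 : Int)) "T")
        else result
      else result) res).length = res.length ∧
    (∀ k : Nat, (model.foldl (fun result lit =>
      if 1 ≤ lit ∧ lit ≤ (matrix.length : Int) * (m0 : Int) then
        if PySem.List.pyGetD (PySem.List.pyGetD matrix (PySem.Int.floordiv (lit - 1) (m0 : Int)) [])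
            (PySem.Int.mod (lit - 1) (m0 : Int)) "" == "_" then
          PySem.List.pySetD result (PySem.Int.floordiv (lit - 1) (m0 : Int))
            (PySem.List.pySetD
              (PySem.List.pyGetD result (PySem.Int.floordiv (lit - 1) (m0 : Int)) [])
              (PySem.Int.mod (lit - 1) (m0 : Int)) "T")
        else result
      else result) res)[k]?.map List.length = res[k]?.map List.length) ∧
    (∀ k t : Nat, (model.foldl (fun result lit =>
      if 1 ≤ lit ∧ lit ≤ (matrix.length : Int) * (m0 : Int) then
        if PySem.List.pyGetD (PySem.List.pyGetD matrix (PySem.Int.floordiv (lit - 1) (m0 : Int)) [])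
            (PySem.Int.mod (lit - 1) (m0 : Int)) "" == "_" then
          PySem.List.pySetD result (PySem.Int.floordiv (lit - 1) (m0 : Int))
            (PySem.List.pySetD
              (PySem.List.pyGetD result (PySem.Int.floordiv (lit - 1) (m0 : Int)) [])
              (PySem.Int.mod (lit - 1) (m0 : Int)) "T")
        else result
      else result) res)[k]?.bind (fun row => row[t]?) =
      if pvHitB model matrix m0 k t then some "T" else res[k]?.bind (fun row => row[t]?)) := by
  induction model with
  | nil =>
    intro res hlen hrows
    refine ⟨rfl, fun k => rfl, fun k t => ?_⟩
    simp [pvHitB]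
  | cons lit rest ih =>
    intro res hlen hrows
    simp only [List.foldl_cons]
    by_cases hg : 1 ≤ lit ∧ lit ≤ (matrix.length : Int) * (m0 : Int)
    · have hm0pos : 0 < m0 := by
        rcases Nat.eq_zero_or_pos m0 with h0 | h; · subst h0; simp at hg; omega
        exact h
      have hm0 : (0 : Int) < (m0 : Int) := by exact_mod_cast hm0pos
      set q : Int := PySem.Int.floordiv (lit - 1) (m0 : Int) with hq
      set r : Int := PySem.Int.mod (lit - 1) (m0 : Int) with hr
      have hq0 : 0 ≤ q := by
        rw [hq]
        exact (PySem.Int.le_floordiv_iff_mul_le (q := 0) hm0).mpr (by simpa using by omega)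
      have hqN : q < (matrix.length : Int) := by
        rw [hq]
        exact (PySem.Int.floordiv_lt_iff_lt_mul hm0).mpr (by linarith [hg.2])
      have hr0 : 0 ≤ r := PySem.Int.mod_nonneg _ hm0
      have hrlt : r < (m0 : Int) := PySem.Int.mod_lt _ hm0
      have hkq : q = ((q.toNat : Nat) : Int) := (Int.toNat_of_nonneg hq0).symm
      have htr : r = ((r.toNat : Nat) : Int) := (Int.toNat_of_nonneg hr0).symm
      have hkqlt : q.toNat < matrix.length := by omega
      have hkqres : q.toNat < res.length := by omega
      have hmrow : m0 ≤ (matrix.getD q.toNat []).length := by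
        apply hrowlen
        rw [List.getD, List.getElem?_eq_getElem hkqlt]
        exact List.getElem_mem hkqlt
      have hreslen : (res.getD q.toNat []).length = (matrix.getD q.toNat []).length := by
        have := hrows q.toNat
        rw [List.getD, List.getD, List.getElem?_eq_getElem hkqlt, List.getElem?_eq_getElem hkqres] at *
        simpa using this
      have htrrow : r.toNat < (res.getD q.toNat []).length := by omega
      -- the head literal's clause in pvHitB
      have hclause : ∀ k t : Nat,
          (decide (1 ≤ lit ∧ lit ≤ (matrix.length : Int) * (m0 : Int)) &&
           decide (PySem.Int.floordiv (lit - 1) (m0 : Int) = (k : Int)) &&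
           decide (PySem.Int.mod (lit - 1) (m0 : Int) = (t : Int)) &&
           pvCondA matrix (k : Int) (t : Int)) =
          ((decide (k = q.toNat) && decide (t = r.toNat)) && pvCondA matrix q r) := by
        intro k t
        rw [← hq, ← hr]
        by_cases h1 : q = (k : Int)
        · by_cases h2 : r = (t : Int)
          · have e1 : k = q.toNat := by omega
            have e2 : t = r.toNat := by omega
            rw [h1, h2]
            simp [hg]
          · have e2 : ¬ (t = r.toNat) := by omega
            simp [hg, h1, h2, e2]
        · have e1 : ¬ (k = q.toNat) := by omega
          simp [hg, h1, e1]
      rw [if_pos hg]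
      by_cases hc : (PySem.List.pyGetD (PySem.List.pyGetD matrix q []) r "" == "_") = true
      · rw [if_pos hc]
        rw [PySem.List.pySetD_of_nonneg _ _ hq0, PySem.List.pyGetD_of_nonneg _ _ hq0,
          PySem.List.pySetD_of_nonneg _ _ hr0]
        set res' := res.set q.toNat ((res.getD q.toNat []).set r.toNat "T") with hres'
        have hlen' : res'.length = res.length := by simp [hres']
        have hrowsres : ∀ k : Nat, res'[k]?.map List.length = res[k]?.map List.length := by
          intro k
          rw [hres', List.getElem?_set]
          by_cases hk : q.toNat = k
          · subst hk
            simp [hkqres, List.getElem?_eq_getElem hkqres]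
          · simp [hk]
        obtain ⟨L1, L2, L3⟩ := ih res' (by omega) (fun k => (hrowsres k).trans (hrows k))
        refine ⟨L1.trans hlen', fun k => (L2 k).trans (hrowsres k), fun k t => ?_⟩
        rw [L3 k t]
        have hsplit : pvHitB (lit :: rest) matrix m0 k t =
            (((decide (k = q.toNat) && decide (t = r.toNat)) && pvCondA matrix q r) ||
             pvHitB rest matrix m0 k t) := by
          rw [pvHitB, List.any_cons, hclause k t]; rfl
        rw [hsplit]
        by_cases hrest : pvHitB rest matrix m0 k t = true
        · simp [hrest]
        · simp only [hrest, Bool.or_false, if_neg (by simp [hrest] : ¬ (pvHitB rest matrix m0 k t = true))]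
          have hcond' : pvCondA matrix q r = true := hc
          by_cases hk : k = q.toNat
          · subst hk
            have hgq : res'[q.toNat]? = some ((res.getD q.toNat []).set r.toNat "T") := by
              rw [hres', List.getElem?_set_self hkqres]
            rw [hgq]
            have hget : res[q.toNat]? = some (res.getD q.toNat []) := by
              rw [List.getElem?_eq_getElem hkqres, List.getD_eq_getElem res [] hkqres]
            rw [hget]
            by_cases ht : t = r.toNat
            · subst ht
              have htrrow' : r.toNat < (res[q.toNat]?.getD []).length := htrrow
              simp [hcond', List.getElem?_set_self htrrow']
            · simp [ht, hcond', List.getElem?_set_ne (Ne.symm ht)]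
          · simp [hk, hres', List.getElem?_set_ne (Ne.symm hk)]
      · rw [if_neg hc]
        obtain ⟨L1, L2, L3⟩ := ih res hlen hrows
        refine ⟨L1, L2, fun k t => ?_⟩
        rw [L3 k t]
        have : pvHitB (lit :: rest) matrix m0 k t = pvHitB rest matrix m0 k t := by
          rw [pvHitB, List.any_cons, hclause k t]
          rw [Bool.not_eq_true] at hc
          have hcf : pvCondA matrix q r = false := hc
          simp [hcf, pvHitB]
        rw [this]
    · rw [if_neg hg]
      obtain ⟨h1, h2, h3⟩ := ih res hlen hrows
      refine ⟨h1, h2, fun k t => ?_⟩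
      rw [h3 k t]
      have : pvHitB (lit :: rest) matrix m0 k t = pvHitB rest matrix m0 k t := by
        simp [pvHitB, List.any_cons, hg]
      rw [this]
lemma pv_hit_iff (model : List Int) (matrix : List (List String)) (m0 k t : Nat)
    (hk : k < matrix.length) (ht : t < m0) (hcond : pvCondA matrix (k : Int) (t : Int) = true) :
    (pvHitB model matrix m0 k t = true) ↔ ((k : Int) * (m0 : Int) + (t : Int) + 1) ∈ model := by
  have hm0 : (0 : Int) < (m0 : Int) := by exact_mod_cast Nat.pos_of_ne_zero (by omega)
  constructor
  · intro h
    rw [pvHitB, List.any_eq_true] at h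
    obtain ⟨lit, hmem, hcl⟩ := h
    simp only [Bool.and_eq_true, decide_eq_true_eq] at hcl
    obtain ⟨⟨⟨hg, hfd⟩, hmd⟩, -⟩ := hcl
    have hdm := PySem.Int.floordiv_mul_add_mod (lit - 1) (m0 : Int)
    rw [hfd, hmd] at hdm
    have hlit : lit = (k : Int) * (m0 : Int) + (t : Int) + 1 := by linarith
    rwa [hlit] at hmem
  · intro hmem
    have htI : ((t : Int)) < (m0 : Int) := by exact_mod_cast ht
    have hkI : ((k : Int)) < (matrix.length : Int) := by exact_mod_cast hk
    have hfd : PySem.Int.floordiv ((k : Int) * (m0 : Int) + (t : Int) + 1 - 1) (m0 : Int) = (k : Int) := by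
      rw [PySem.Int.floordiv_eq_iff_of_pos hm0]
      constructor
      · have : (0 : Int) ≤ (t : Int) := by positivity
        linarith
      · have : ((k : Int) + 1) * (m0 : Int) = (k : Int) * (m0 : Int) + (m0 : Int) := by ring
        linarith
    have hmd : PySem.Int.mod ((k : Int) * (m0 : Int) + (t : Int) + 1 - 1) (m0 : Int) = (t : Int) := by
      have hdm := PySem.Int.floordiv_mul_add_mod ((k : Int) * (m0 : Int) + (t : Int) + 1 - 1) (m0 : Int)
      rw [hfd] at hdm
      linarith
    rw [pvHitB, List.any_eq_true]
    refine ⟨_, hmem, ?_⟩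
    simp only [Bool.and_eq_true, decide_eq_true_eq]
    have hge1 : (1 : Int) ≤ (k : Int) * (m0 : Int) + (t : Int) + 1 := by
      have h1 : (0 : Int) ≤ (k : Int) * (m0 : Int) := by positivity
      have h2 : (0 : Int) ≤ (t : Int) := by positivity
      linarith
    refine ⟨⟨⟨⟨hge1, ?_⟩, hfd⟩, hmd⟩, hcond⟩
    have h1 : ((k : Int) + 1) * (m0 : Int) ≤ (matrix.length : Int) * (m0 : Int) := by
      apply mul_le_mul_of_nonneg_right _ (le_of_lt hm0)
      omega
    nlinarith
lemma pv_hit_false (model : List Int) (matrix : List (List String)) (m0 k t : Nat)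
    (ht : m0 ≤ t) : pvHitB model matrix m0 k t = false := by
  rw [pvHitB, List.any_eq_false]
  intro lit hmem
  by_cases hg : 1 ≤ lit ∧ lit ≤ (matrix.length : Int) * (m0 : Int)
  · have hm0 : (0 : Int) < (m0 : Int) := by
      rcases Nat.eq_zero_or_pos m0 with h0 | h
      · exfalso; rw [h0] at hg; simp at hg; omega
      · exact_mod_cast h
    have hlt := PySem.Int.mod_lt (lit - 1) hm0
    have hne : ¬ (PySem.Int.mod (lit - 1) (m0 : Int) = (t : Int)) := by
      have : ((m0 : Int)) ≤ (t : Int) := by exact_mod_cast ht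
      omega
    simp [hne]
  · simp [hg]
lemma pv_hit_cond_false (model : List Int) (matrix : List (List String)) (m0 k t : Nat)
    (hc : ¬ pvCondA matrix (k : Int) (t : Int) = true) :
    pvHitB model matrix m0 k t = false := by
  rw [pvHitB, List.any_eq_false]
  intro lit hmem
  simp [Bool.not_eq_true] at hc
  simp [hc]
-- conversion of the port surface syntax into the pv_grid_char shape
lemma pv_range_cast (n : Nat) :
    PySem.List.pyRange 0 (n : Int) 1 = (List.range n).map Int.ofNat := by
  rw [PySem.List.pyRange_one]
  simp [Int.ofNat_eq_natCast]

-- A's result, rowwise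
lemma pv_A_char (model : List Int) (matrix : List (List String)) (k : Nat) :
    (interpret_model model matrix)[k]? =
    if k < matrix.length then
      some (pvRow matrix (matrix.getD 0 []).length
        (fun i j => if model.contains (coordinate_to_literal i j ((matrix.getD 0 []).length : Int))
          then "T" else "G") k)
    else none := by
  rw [interpret_model]
  simp only [PySem.List.len_eq, PySem.List.pyGetD_zero, List.map_id']
  rw [show PySem.List.pyRange 0 ((matrix.length : Nat) : Int) 1
      = (List.range matrix.length).map Int.ofNat from pv_range_cast matrix.length]
  have hstep : (fun (result : List (List String)) (i : Int) =>
      (PySem.List.pyRange 0 ((matrix.getD 0 []).length : Int) 1).foldl (fun result j =>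
        if PySem.List.pyGetD (PySem.List.pyGetD matrix i []) j "" == "_" then
          if model.contains (coordinate_to_literal i j ((matrix.getD 0 []).length : Int)) then
            PySem.List.pySetD result i (PySem.List.pySetD (PySem.List.pyGetD result i []) j "T")
          else
            PySem.List.pySetD result i (PySem.List.pySetD (PySem.List.pyGetD result i []) j "G")
        else result) result)
    = (fun (res : List (List String)) (i : Int) =>
      (PySem.List.pyRange 0 ((matrix.getD 0 []).length : Int) 1).foldl (fun res j =>
        if pvCondA matrix i j then
          PySem.List.pySetD res i
            (PySem.List.pySetD (PySem.List.pyGetD res i []) j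
              (if model.contains (coordinate_to_literal i j ((matrix.getD 0 []).length : Int))
                then "T" else "G"))
        else res) res) := by
    funext result i
    congr 1
    funext res j
    rw [pvCondA]
    split_ifs <;> rfl
  rw [hstep]
  exact pv_grid_char matrix (matrix.getD 0 []).length _ k

-- B's fill pass, rowwise
lemma pv_Bfill_char (matrix : List (List String)) (k : Nat) :
    ((((List.range matrix.length).map Int.ofNat)).foldl (fun result i =>
      (PySem.List.pyRange 0 (((matrix.getD 0 []).length : Nat) : Int) 1).foldl (fun result j =>
        if PySem.List.pyGetD (PySem.List.pyGetD matrix i []) j "" == "_" then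
          PySem.List.pySetD result i (PySem.List.pySetD (PySem.List.pyGetD result i []) j "G")
        else result) result) matrix)[k]? =
    if k < matrix.length then
      some (pvRow matrix (matrix.getD 0 []).length (fun _ _ => "G") k)
    else none := by
  have hstep : (fun (result : List (List String)) (i : Int) =>
      (PySem.List.pyRange 0 (((matrix.getD 0 []).length : Nat) : Int) 1).foldl (fun result j =>
        if PySem.List.pyGetD (PySem.List.pyGetD matrix i []) j "" == "_" then
          PySem.List.pySetD result i (PySem.List.pySetD (PySem.List.pyGetD result i []) j "G")
        else result) result)
    = (fun (res : List (List String)) (i : Int) =>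
      (PySem.List.pyRange 0 (((matrix.getD 0 []).length : Nat) : Int) 1).foldl (fun res j =>
        if pvCondA matrix i j then
          PySem.List.pySetD res i
            (PySem.List.pySetD (PySem.List.pyGetD res i []) j ((fun _ _ => "G") i j))
        else res) res) := rfl
  rw [hstep]
  exact pv_grid_char matrix (matrix.getD 0 []).length _ k

-- the blank test, concretely
lemma pv_cond_char (matrix : List (List String)) (k t : Nat) :
    pvCondA matrix (k : Int) (t : Int) = ((matrix.getD k []).getD t "" == "_") := by
  rw [pvCondA, PySem.List.pyGetD_natCast, PySem.List.pyGetD_natCast]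

-- the blank test only holds inside the row
lemma pv_cond_lt (matrix : List (List String)) (k t : Nat)
    (hc : pvCondA matrix (k : Int) (t : Int) = true) : t < (matrix.getD k []).length := by
  by_contra hcon
  rw [pv_cond_char matrix k t] at hc
  rw [List.getD_eq_default] at hc
  · simp at hc
  · omega

-- B's result: length facts and cellwise values
lemma pv_B_char (model : List Int) (matrix : List (List String))
    (hrowlen : ∀ row ∈ matrix, (matrix.getD 0 []).length ≤ row.length) :
    (interpret_model_alt model matrix).length = matrix.length ∧
    (∀ k t : Nat, (interpret_model_alt model matrix)[k]?.bind (fun row => row[t]?) =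
      if pvHitB model matrix (matrix.getD 0 []).length k t then some "T"
      else if k < matrix.length then
        (pvRow matrix (matrix.getD 0 []).length (fun _ _ => "G") k)[t]?
      else none) := by
  rw [interpret_model_alt]
  simp only [PySem.List.len_eq, PySem.List.pyGetD_zero, List.map_id']
  rw [show PySem.List.pyRange 0 ((matrix.length : Nat) : Int) 1
      = (List.range matrix.length).map Int.ofNat from pv_range_cast matrix.length]
  set m0 : Nat := (matrix.getD 0 []).length with hm0
  set fill : List (List String) := ((List.range matrix.length).map Int.ofNat).foldl (fun result i =>
      (PySem.List.pyRange 0 (m0 : Int) 1).foldl (fun result j =>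
        if PySem.List.pyGetD (PySem.List.pyGetD matrix i []) j "" == "_" then
          PySem.List.pySetD result i (PySem.List.pySetD (PySem.List.pyGetD result i []) j "G")
        else result) result) matrix with hfill
  have hfillk : ∀ k : Nat, fill[k]? =
      if k < matrix.length then some (pvRow matrix m0 (fun _ _ => "G") k) else none := by
    intro k
    rw [hfill]
    exact pv_Bfill_char matrix k
  have hfilllen : fill.length = matrix.length := by
    apply pv_length_of_getElem?
    intro k
    rw [hfillk k]
    by_cases hk : k < matrix.length <;> simp [hk]
  have hrowlen' : ∀ k : Nat, k < matrix.length →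
      (pvRow matrix m0 (fun _ _ => "G") k).length = (matrix.getD k []).length := by
    intro k _
    rw [pvRow]
    exact pv_row_fold_length _ _ _ _
  have hfillrows : ∀ k : Nat, fill[k]?.map List.length = matrix[k]?.map List.length := by
    intro k
    rw [hfillk k]
    by_cases hk : k < matrix.length
    · rw [if_pos hk, List.getElem?_eq_getElem hk]
      simp only [Option.map_some]
      rw [hrowlen' k hk, List.getD_eq_getElem matrix [] hk]
    · rw [if_neg hk, List.getElem?_eq_none (by omega)]
  obtain ⟨L1, -, L3⟩ := pv_model_fold matrix m0 hrowlen model fill hfilllen hfillrows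
  refine ⟨L1.trans hfilllen, fun k t => ?_⟩
  rw [L3 k t]
  cases hhit : pvHitB model matrix m0 k t
  · simp only [Bool.false_eq_true, if_false]
    rw [hfillk k]
    by_cases hk : k < matrix.length <;> simp [hk]
  · simp only [if_true]

-- the two results agree at every cell
lemma pv_rows_agree (model : List Int) (matrix : List (List String))
    (hpre : Pre_interpret_model model matrix)
    (k : Nat) (hk : k < matrix.length) (t : Nat) (rowB : List String)
    (hrowB : (interpret_model_alt model matrix)[k]? = some rowB) :
    (pvRow matrix (matrix.getD 0 []).length
      (fun i j => if model.contains (coordinate_to_literal i j ((matrix.getD 0 []).length : Int))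
        then "T" else "G") k)[t]? = rowB[t]? := by
  set m0 : Nat := (matrix.getD 0 []).length with hm0def
  obtain ⟨-, L3⟩ := pv_B_char model matrix hpre.2
  have hB := L3 k t
  rw [hrowB] at hB
  simp only [Option.bind_some] at hB
  rw [hB, if_pos hk]
  set row : List String := matrix.getD k [] with hrowdef
  have hjs : ∀ j ∈ PySem.List.pyRange 0 (m0 : Int) 1, 0 ≤ j :=
    fun j hj => (PySem.List.mem_pyRange_one.mp hj).1
  rw [pvRow, pv_row_fold_getElem? _ _ _ hjs row t,
    pvRow, pv_row_fold_getElem? _ _ _ hjs row t]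
  have hmemiff : ((t : Int) ∈ PySem.List.pyRange 0 (m0 : Int) 1) ↔ t < m0 := by
    rw [PySem.List.mem_pyRange_one]
    omega
  by_cases hcnd : pvCondA matrix (k : Int) (t : Int) = true
  · have htlen : t < row.length := pv_cond_lt matrix k t hcnd
    by_cases htm : t < m0
    · have hin : (t : Int) ∈ PySem.List.pyRange 0 (m0 : Int) 1 ∧
          pvCondA matrix (k : Int) (t : Int) = true ∧ t < row.length :=
        ⟨hmemiff.mpr htm, hcnd, htlen⟩
      have hlit : coordinate_to_literal (k : Int) (t : Int) (m0 : Int) =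
          (k : Int) * (m0 : Int) + (t : Int) + 1 := rfl
      by_cases hcont : ((k : Int) * (m0 : Int) + (t : Int) + 1) ∈ model
      · have hhit : pvHitB model matrix m0 k t = true :=
          (pv_hit_iff model matrix m0 k t hk htm hcnd).mpr hcont
        rw [if_pos hin, hlit, if_pos (List.contains_iff_mem.mpr hcont), hhit]
        simp
      · have hhit : pvHitB model matrix m0 k t = false := by
          rw [← Bool.not_eq_true]
          intro h
          exact hcont ((pv_hit_iff model matrix m0 k t hk htm hcnd).mp h)
        rw [if_pos hin, hlit, if_neg (fun h => hcont (List.contains_iff_mem.mp h)), hhit]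
        simp only [Bool.false_eq_true, if_false]
        rw [if_pos hin]
    · have hhit : pvHitB model matrix m0 k t = false :=
        pv_hit_false model matrix m0 k t (by omega)
      rw [hhit]
      simp only [Bool.false_eq_true, if_false]
      rw [if_neg (fun h => htm (hmemiff.mp h.1)), if_neg (fun h => htm (hmemiff.mp h.1))]
  · have hhit : pvHitB model matrix m0 k t = false :=
      pv_hit_cond_false model matrix m0 k t hcnd
    rw [hhit]
    simp only [Bool.false_eq_true, if_false]
    rw [if_neg (fun h => hcnd h.2.1), if_neg (fun h => hcnd h.2.1)]

-- ===== VERDICT (by name: the statement is the Claim_ definition above) =====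
theorem interpret_model_spec : Claim_equal_interpret_model := by
  intro model matrix _ hpre
  unfold Spec_interpret_model
  obtain ⟨LB1, -⟩ := pv_B_char model matrix hpre.2
  apply List.ext_getElem?
  intro k
  rw [pv_A_char model matrix k]
  by_cases hk : k < matrix.length
  · rw [if_pos hk]
    have hkB : k < (interpret_model_alt model matrix).length := by omega
    have hrowB : (interpret_model_alt model matrix)[k]? =
        some ((interpret_model_alt model matrix)[k]) := List.getElem?_eq_getElem hkB
    rw [hrowB]
    congr 1
    apply List.ext_getElem?
    intro t
    exact pv_rows_agree model matrix hpre k hk t _ hrowB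
  · rw [if_neg hk, List.getElem?_eq_none (by omega)]
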